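-- pv_equiv track=rewrite | github.com/AngeloSouza1/DesafiosOBC | Pergaminho/magic_word.py | encontrar_palavra_magica
-- ===== SOURCE A (Python) =====
-- def encontrar_palavra_magica(pergaminho):
--     """
--     Encontra a palavra que aparece um número ímpar de vezes na string.
--
--     Args:
--         pergaminho (str): A string contendo palavras separadas por espaços.
--
--     Returns:
--         str: A palavra mágica que aparece um número ímpar de vezes.
--     """
--     # Divide o pergaminho em palavras
--     palavras = pergaminho.split()
--
--     # Dicionário para contar as ocorrências
--     contador = {}
--
--     # Conta as ocorrências de cada palavra
--     for palavra in palavras: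
--         if palavra in contador:
--             contador[palavra] += 1
--         else:
--             contador[palavra] = 1
--
--     # Encontra a palavra com número ímpar de ocorrências
--     for palavra, frequencia in contador.items():
--         if frequencia % 2 != 0:
--             return palavra
-- ===== SOURCE B (Python) =====
-- def encontrar_palavra_magica(pergaminho):
--     palavras = pergaminho.split()
--     # Parity set: toggle membership per occurrence; afterwards it holds exactly
--     # the words with an odd count. No counting at all.
--     impares = set()
--     for w in palavras:
--         if w in impares:
--             impares.discard(w)
--         else:
--             impares.add(w)
--     # First word of the scroll that ended up with odd parity.
--     for w in palavras:
--         if w in impares: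
--             return w
-- ===== Notes on version B (the rewrite author's own statement) =====
-- stated objective: alternative
-- what changed: Replaces the count-then-scan-the-frequency-table strategy by a parity-toggle set (symmetric-difference accumulator): each occurrence toggles the word in a set, so no counts are ever kept, and the answer is the first word of the scroll left in the set.
import Mathlib
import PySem

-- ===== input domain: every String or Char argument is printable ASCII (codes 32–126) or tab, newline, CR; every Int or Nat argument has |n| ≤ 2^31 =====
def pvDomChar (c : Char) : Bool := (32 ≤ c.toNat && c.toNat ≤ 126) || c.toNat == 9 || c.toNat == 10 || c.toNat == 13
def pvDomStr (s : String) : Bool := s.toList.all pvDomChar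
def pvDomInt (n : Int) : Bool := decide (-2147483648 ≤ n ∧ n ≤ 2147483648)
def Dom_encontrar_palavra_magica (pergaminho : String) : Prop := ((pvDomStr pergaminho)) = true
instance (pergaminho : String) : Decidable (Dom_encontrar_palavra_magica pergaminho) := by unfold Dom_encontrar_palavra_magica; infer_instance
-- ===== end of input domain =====

-- B replaces A's frequency table by a parity-toggle set (each occurrence toggles the word
-- in a set, so the set ends up holding exactly the odd-count words) and returns the first
-- word of the scroll left in the set; objective: alternative (no counts kept at all).

-- ===== PORT A =====
def encontrar_palavra_magica (pergaminho : String) : Option String :=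
  let palavras := PySem.Str.split₀ pergaminho
  let contador : PySem.Dict String Int :=
    palavras.foldl (fun d palavra =>
      if d.contains palavra then d.modify palavra 0 (· + 1)
      else d.insert palavra 1) PySem.Dict.empty
  (contador.items.find? (fun p => p.2 % 2 != 0)).map (·.1)

-- ===== PORT B =====
def encontrar_palavra_magica_alt (pergaminho : String) : Option String :=
  let palavras := PySem.Str.split₀ pergaminho
  let impares : PySem.Set String :=
    palavras.foldl (fun s w =>
      if PySem.Set.contains s w then PySem.Set.discard s w else PySem.Set.add s w)
      PySem.Set.empty
  palavras.find? (fun w => PySem.Set.contains impares w)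

-- ===== PRECONDITION & SPEC =====
def Spec_encontrar_palavra_magica (pergaminho : String) (out : Option String) : Prop := out = encontrar_palavra_magica_alt pergaminho
instance (pergaminho : String) (out : Option String) : Decidable (Spec_encontrar_palavra_magica pergaminho out) := by unfold Spec_encontrar_palavra_magica; infer_instance

-- ===== CLAIM (what is proved, stated in full; the proofs are below) =====
def Claim_equal_encontrar_palavra_magica : Prop := ∀ (pergaminho : String), Dom_encontrar_palavra_magica pergaminho → Spec_encontrar_palavra_magica pergaminho (encontrar_palavra_magica pergaminho)

-- ===== LEMMAS AND PROOFS =====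

-- A's per-word step (membership test, then += 1 or = 1) is exactly Counter's modify step.
theorem pv_step_eq {κ : Type} [BEq κ] [LawfulBEq κ] (d : PySem.Dict κ Int) (x : κ) :
    (if d.contains x then d.modify x 0 (· + 1) else d.insert x 1) = d.modify x 0 (· + 1) := by
  by_cases h : d.contains x = true
  · simp [h]
  · simp [h, PySem.Dict.modify, PySem.Dict.getD,
      (PySem.Dict.get?_eq_none_iff_contains d x).2 (by simp [h])]

theorem pv_fold_eq_counter (ws : List String) :
    ws.foldl (fun d palavra =>
      if d.contains palavra then d.modify palavra 0 (· + 1)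
      else d.insert palavra 1) PySem.Dict.empty = PySem.Dict.counter ws := by
  rw [PySem.Dict.counter_eq_foldl]
  congr 1
  funext d x
  exact pv_step_eq d x

-- find? commutes with appending elements that never satisfy p on the left accumulator.
theorem pv_find?_foldl_add_of_some {α : Type} [BEq α] [LawfulBEq α] (p : α → Bool) (a : α) :
    ∀ (xs : List α) (s : List α), s.find? p = some a →
      (xs.foldl PySem.Set.add s).find? p = some a := by
  intro xs
  induction xs with
  | nil => intro s h; simpa using h
  | cons x xs ih =>
    intro s h
    simp only [List.foldl_cons]
    apply ih
    rw [PySem.Set.add_eq_ite]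
    split
    · exact h
    · rw [List.find?_append, h]; rfl

-- first-occurrence dedup does not change the first element satisfying p.
theorem pv_find?_foldl_add {α : Type} [BEq α] [LawfulBEq α] (p : α → Bool) :
    ∀ (xs : List α) (s : List α), s.find? p = none →
      (xs.foldl PySem.Set.add s).find? p = xs.find? p := by
  intro xs
  induction xs with
  | nil => intro s h; simpa using h
  | cons x xs ih =>
    intro s h
    simp only [List.foldl_cons]
    by_cases hp : p x = true
    · have hxs : ¬ x ∈ s := by
        intro hmem
        have := List.find?_eq_none.mp h x hmem
        simp [hp] at this
      have : (PySem.Set.add s x).find? p = some x := by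
        rw [PySem.Set.add_of_not_mem hxs, List.find?_append, h]
        simp [hp]
      rw [pv_find?_foldl_add_of_some p x xs _ this, List.find?_cons_of_pos hp]
    · have hpx : p x = false := by simpa using hp
      have : (PySem.Set.add s x).find? p = none := by
        rw [PySem.Set.add_eq_ite]
        split
        · exact h
        · rw [List.find?_append, h, List.find?_cons_of_neg (by simp [hpx])]; rfl
      rw [ih _ this, List.find?_cons_of_neg (by simp [hpx])]
  
theorem pv_find?_ofList {α : Type} [BEq α] [LawfulBEq α] (p : α → Bool) (xs : List α) :
    (PySem.Set.ofList xs).find? p = xs.find? p := by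
  rw [PySem.Set.ofList_eq_foldl]
  exact pv_find?_foldl_add p xs [] rfl

-- The parity-toggle loop: the set holds w iff (membership in the start set) XOR (odd count).
theorem pv_toggle_mem :
    ∀ (ws : List String) (s : PySem.Set String), s.Nodup →
      (ws.foldl (fun s w =>
        if PySem.Set.contains s w then PySem.Set.discard s w else PySem.Set.add s w) s).Nodup ∧
      ∀ w, w ∈ ws.foldl (fun s w =>
        if PySem.Set.contains s w then PySem.Set.discard s w else PySem.Set.add s w) s ↔
        Xor' (w ∈ s) (ws.count w % 2 = 1) := by
  intro ws
  induction ws with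
  | nil =>
    intro s hs
    refine ⟨hs, fun w => ?_⟩
    simp [Xor']
  | cons x xs ih =>
    intro s hs
    simp only [List.foldl_cons]
    have hpar : ∀ n : Nat, ((n + 1) % 2 = 1 ↔ ¬ (n % 2 = 1)) := by omega
    by_cases hc : PySem.Set.contains s x = true
    · have hxmem : x ∈ s := (PySem.Set.contains_iff s x).mp hc
      obtain ⟨hn, hm⟩ := ih (PySem.Set.discard s x) (PySem.Set.nodup_discard s x hs)
      rw [if_pos hc]
      refine ⟨hn, fun w => ?_⟩
      rw [hm w, PySem.Set.mem_discard]
      by_cases hwx : w = x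
      · subst hwx
        rw [List.count_cons_self]
        have := hpar (xs.count w)
        simp only [Xor']
        tauto
      · rw [show List.count w (x :: xs) = List.count w xs by simp [List.count_cons]; exact fun h => hwx h.symm]
        simp only [Xor']
        tauto
    · have hxmem : ¬ x ∈ s := fun h => hc ((PySem.Set.contains_iff s x).mpr h)
      obtain ⟨hn, hm⟩ := ih (PySem.Set.add s x) (PySem.Set.nodup_add s x hs)
      rw [if_neg hc]
      refine ⟨hn, fun w => ?_⟩
      rw [hm w, PySem.Set.mem_add]
      by_cases hwx : w = x
      · subst hwx
        rw [List.count_cons_self]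
        have := hpar (xs.count w)
        simp only [Xor']
        tauto
      · rw [show List.count w (x :: xs) = List.count w xs by simp [List.count_cons]; exact fun h => hwx h.symm]
        simp only [Xor']
        tauto

-- the toggle set's membership test is the odd-count test.
theorem pv_toggle_pred (ws : List String) (w : String) :
    PySem.Set.contains
      (ws.foldl (fun s w =>
        if PySem.Set.contains s w then PySem.Set.discard s w else PySem.Set.add s w)
        PySem.Set.empty) w
    = (((ws.count w : Int)) % 2 != 0) := by
  obtain ⟨_, hm⟩ := pv_toggle_mem ws PySem.Set.empty (by simp [PySem.Set.empty])
  have hmem : w ∈ ws.foldl (fun s w =>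
      if PySem.Set.contains s w then PySem.Set.discard s w else PySem.Set.add s w)
      PySem.Set.empty ↔ ws.count w % 2 = 1 := by
    rw [hm w]
    simp [Xor', PySem.Set.empty]
  by_cases h : ws.count w % 2 = 1
  · rw [(PySem.Set.contains_iff _ w).mpr (hmem.mpr h)]
    have h2 : ((ws.count w : Int)) % 2 = 1 := by omega
    simp [h2]
  · have hcf : PySem.Set.contains (ws.foldl (fun s w =>
        if PySem.Set.contains s w then PySem.Set.discard s w else PySem.Set.add s w)
        PySem.Set.empty) w = false := by
      rw [← Bool.not_eq_true, PySem.Set.contains_iff]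
      exact fun hmw => h (hmem.mp hmw)
    rw [hcf]
    have h2 : ((ws.count w : Int)) % 2 = 0 := by omega
    simp [h2]

-- ===== VERDICT (by name: the statement is the Claim_ definition above) =====
theorem encontrar_palavra_magica_spec : Claim_equal_encontrar_palavra_magica := by
  intro pergaminho _
  unfold Spec_encontrar_palavra_magica encontrar_palavra_magica encontrar_palavra_magica_alt
  simp only [pv_fold_eq_counter, PySem.Dict.items_counter, List.find?_map,
    Function.comp_def, Option.map_map]
  rw [pv_find?_ofList, funext (pv_toggle_pred (PySem.Str.split₀ pergaminho))]
  simp
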